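-- pv_equiv track=rewrite | github.com/alexandraback/datacollection | solutions_5644738749267968_0/Python/ctunoku/war.py | d_war
-- ===== SOURCE A (Python) =====
-- def d_war(n_blocks, k_blocks):
--     score = 0
--     while len(n_blocks) > 0:
--         if n_blocks[0] < k_blocks[0]:
--             k_blocks = k_blocks[:-1]
--         else:
--             score += 1
--             k_blocks = k_blocks[1:]
--         n_blocks = n_blocks[1:]
--
--     return score
-- ===== SOURCE B (Python) =====
-- def d_war(n_blocks, k_blocks):
--     # One pass: score doubles as an index into the original k_blocks,
--     # since A always compares against the current front of k_blocks,
--     # which is k_blocks[score] of the original list.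
--     score = 0
--     for x in n_blocks:
--         if x >= k_blocks[score]:
--             score += 1
--     return score
-- ===== Notes on version B (the rewrite author's own statement) =====
-- stated objective: faster
-- what changed: Replaces the while-loop that re-slices both lists each iteration with a single pass over n_blocks using the score itself as an index into the original k_blocks.
import Mathlib
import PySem

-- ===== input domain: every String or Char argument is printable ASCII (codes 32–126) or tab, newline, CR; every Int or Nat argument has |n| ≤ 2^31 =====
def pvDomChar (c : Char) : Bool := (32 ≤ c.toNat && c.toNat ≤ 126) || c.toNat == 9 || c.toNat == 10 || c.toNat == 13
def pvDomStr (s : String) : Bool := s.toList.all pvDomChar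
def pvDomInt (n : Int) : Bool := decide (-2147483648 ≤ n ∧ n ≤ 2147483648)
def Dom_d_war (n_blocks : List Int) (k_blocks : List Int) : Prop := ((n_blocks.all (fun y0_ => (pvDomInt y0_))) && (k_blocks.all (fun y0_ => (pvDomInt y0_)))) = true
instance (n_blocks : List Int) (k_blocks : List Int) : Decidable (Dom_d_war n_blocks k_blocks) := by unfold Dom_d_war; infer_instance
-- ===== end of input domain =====

-- B replaces A's quadratic slice-and-shrink while-loop by a single pass over
-- n_blocks that uses the score itself as an index into the original k_blocks.

-- ===== PORT A =====
-- A's while-loop: while n_blocks nonempty, compare n_blocks[0] with k_blocks[0],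
-- drop k's last or first element accordingly, drop n's first.
def dWarLoopA : List Int → List Int → Int → Int
  | [], _, score => score
  | x :: t, k_blocks, score =>
    if (PySem.List.pyGet? (x :: t) 0).getD 0 < (PySem.List.pyGet? k_blocks 0).getD 0 then
      -- k_blocks = k_blocks[:-1]; n_blocks = n_blocks[1:]
      dWarLoopA (PySem.List.slice (x :: t) (some 1) none)
                (PySem.List.slice k_blocks none (some (-1))) score
    else
      -- score += 1; k_blocks = k_blocks[1:]; n_blocks = n_blocks[1:]
      dWarLoopA (PySem.List.slice (x :: t) (some 1) none)
                (PySem.List.slice k_blocks (some 1) none) (score + 1)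
termination_by n _ _ => n.length
decreasing_by all_goals simp [PySem.List.slice_from_one]

def d_war (n_blocks : List Int) (k_blocks : List Int) : Int :=
  dWarLoopA n_blocks k_blocks 0

-- ===== PORT B =====
def d_war_alt (n_blocks : List Int) (k_blocks : List Int) : Int :=
  n_blocks.foldl
    (fun score x => if PySem.List.pyGetD k_blocks score 0 ≤ x then score + 1 else score) 0

-- ===== PRECONDITION & SPEC =====
-- Pre_ excludes exactly the inputs where A raises IndexError: when k_blocks is
-- shorter than n_blocks, A's k_blocks window empties while n_blocks is nonempty.
def Pre_d_war (n_blocks : List Int) (k_blocks : List Int) : Prop :=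
  n_blocks.length ≤ k_blocks.length
instance (n_blocks : List Int) (k_blocks : List Int) : Decidable (Pre_d_war n_blocks k_blocks) := by unfold Pre_d_war; infer_instance

def pvWitness_d_war : List Int × List Int := ([3, 1, 2], [2, 2, 5])

def Spec_d_war (n_blocks : List Int) (k_blocks : List Int) (out : Int) : Prop := out = d_war_alt n_blocks k_blocks
instance (n_blocks : List Int) (k_blocks : List Int) (out : Int) : Decidable (Spec_d_war n_blocks k_blocks out) := by unfold Spec_d_war; infer_instance

-- ===== CLAIM (what is proved, stated in full; the proofs are below) =====
def Claim_equal_d_war : Prop := ∀ (n_blocks : List Int) (k_blocks : List Int), Dom_d_war n_blocks k_blocks → Pre_d_war n_blocks k_blocks → Spec_d_war n_blocks k_blocks (d_war n_blocks k_blocks)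

-- ===== LEMMAS AND PROOFS =====

-- Reference count: pointer-into-k formulation of both programs.
def dWarCnt : List Int → List Int → Int
  | [], _ => 0
  | x :: t, ks => if ks.headD 0 ≤ x then 1 + dWarCnt t ks.tail else dWarCnt t ks

-- dWarCnt only reads the first (length of n) elements of ks.
theorem dWarCnt_congr : ∀ (n ks1 ks2 : List Int),
    ks1.take n.length = ks2.take n.length → dWarCnt n ks1 = dWarCnt n ks2 := by
  intro n
  induction n with
  | nil => intro _ _ _; rfl
  | cons x t ih =>
    intro ks1 ks2 h
    have hhead : ks1.headD 0 = ks2.headD 0 := by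
      cases ks1 with
      | nil =>
        cases ks2 with
        | nil => rfl
        | cons b bs => simp at h
      | cons a as =>
        cases ks2 with
        | nil => simp at h
        | cons b bs => simp at h; simp [h.1]
    have htail : ks1.tail.take t.length = ks2.tail.take t.length := by
      cases ks1 with
      | nil =>
        cases ks2 with
        | nil => rfl
        | cons b bs => simp at h
      | cons a as =>
        cases ks2 with
        | nil => simp at h
        | cons b bs => simp at h; simpa using h.2
    simp only [dWarCnt, hhead]
    split_ifs with hc
    · rw [ih _ _ htail]
    · have h2 := congrArg (List.take t.length) h
      rw [List.take_take, List.take_take] at h2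
      rw [ih ks1 ks2 (by simpa [List.length_cons, Nat.min_eq_left (Nat.le_succ _)] using h2)]

-- A's loop computes score + dWarCnt whenever k is long enough.
theorem dWarLoopA_eq_cnt : ∀ (n k : List Int) (s : Int),
    n.length ≤ k.length → dWarLoopA n k s = s + dWarCnt n k := by
  intro n
  induction n with
  | nil => intro k s _; simp [dWarLoopA, dWarCnt]
  | cons x t ih =>
    intro k s hlen
    cases k with
    | nil => simp at hlen
    | cons kh kt =>
      simp only [List.length_cons] at hlen
      have hA : dWarLoopA (x :: t) (kh :: kt) s
          = if x < kh then dWarLoopA t ((kh :: kt).dropLast) s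
            else dWarLoopA t kt (s + 1) := by
        simp only [dWarLoopA, PySem.List.slice_from_one, PySem.List.slice_to_neg_one,
          List.tail_cons]
        congr 1
        simp [pysem]
      rw [hA]
      by_cases hc : x < kh
      · -- A drops the last element of k; the count never looks at it.
        rw [if_pos hc]
        have hlen' : t.length ≤ ((kh :: kt).dropLast).length := by
          simp [List.length_dropLast]; omega
        rw [ih _ s hlen']
        have hcnt : dWarCnt t ((kh :: kt).dropLast) = dWarCnt t (kh :: kt) := by
          apply dWarCnt_congr
          rw [List.dropLast_eq_take, List.take_take]
          congr 1
          simp; omega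
        rw [hcnt]
        simp [dWarCnt, not_le.mpr hc]
      · rw [if_neg hc]
        rw [ih _ (s + 1) (by omega)]
        simp [dWarCnt, not_lt.mp hc]
        ring

-- B's fold from score j counts with a pointer at position j of k.
theorem dWarFoldB_eq_cnt : ∀ (n k : List Int) (j : Nat),
    n.foldl (fun score x => if PySem.List.pyGetD k score 0 ≤ x then score + 1 else score)
        (j : Int)
      = (j : Int) + dWarCnt n (k.drop j) := by
  intro n
  induction n with
  | nil => intro k j; simp [dWarCnt]
  | cons x t ih =>
    intro k j
    have hget : PySem.List.pyGetD k (j : Int) 0 = (List.drop j k).headD 0 := by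
      rw [PySem.List.pyGetD_natCast]
      simp [List.getD, List.headD_eq_head?_getD, List.head?_drop]
    have hcnt : dWarCnt (x :: t) (List.drop j k)
        = if (List.drop j k).headD 0 ≤ x then 1 + dWarCnt t (List.drop (j + 1) k)
          else dWarCnt t (List.drop j k) := by
      simp only [dWarCnt, List.tail_drop]
    simp only [List.foldl_cons, hget, hcnt]
    by_cases hc : (List.drop j k).headD 0 ≤ x
    · rw [if_pos hc, if_pos hc]
      have hj : ((j : Int) + 1) = ((j + 1 : Nat) : Int) := by push_cast; ring
      rw [hj, ih k (j + 1)]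
      push_cast; ring
    · rw [if_neg hc, if_neg hc, ih k j]

-- ===== VERDICT (by name: the statement is the Claim_ definition above) =====
theorem d_war_spec : Claim_equal_d_war := by
  intro n k _ hpre
  unfold Spec_d_war d_war d_war_alt
  rw [dWarLoopA_eq_cnt n k 0 hpre]
  have h := dWarFoldB_eq_cnt n k 0
  simp only [Nat.cast_zero, List.drop_zero, zero_add] at h
  rw [h]
  omega
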